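-- pv_equiv track=rewrite | github.com/MYEONGGEUNCHO/TIL | python/algorithm/basic/6week/2.py | solution
-- ===== SOURCE A (Python) =====
-- def solution(n, control):
--     answer = n
--     for i in range(len(control)):
--         if control[i] == 'w':
--             answer += 1
--         elif control[i] == 's':
--             answer -= 1
--         elif control[i] == 'd':
--             answer += 10
--         elif control[i] == 'a':
--             answer -= 10
--
--     return answer
-- ===== SOURCE B (Python) =====
-- def solution(n, control):
--     return (n + control.count('w') - control.count('s')
--             + 10 * control.count('d') - 10 * control.count('a'))
-- ===== Notes on version B (the rewrite author's own statement) =====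
-- stated objective: idiomatic
-- what changed: Replaces the single accumulating indexed loop with a closed-form arithmetic combination of four whole-string .count scans.
import Mathlib
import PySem

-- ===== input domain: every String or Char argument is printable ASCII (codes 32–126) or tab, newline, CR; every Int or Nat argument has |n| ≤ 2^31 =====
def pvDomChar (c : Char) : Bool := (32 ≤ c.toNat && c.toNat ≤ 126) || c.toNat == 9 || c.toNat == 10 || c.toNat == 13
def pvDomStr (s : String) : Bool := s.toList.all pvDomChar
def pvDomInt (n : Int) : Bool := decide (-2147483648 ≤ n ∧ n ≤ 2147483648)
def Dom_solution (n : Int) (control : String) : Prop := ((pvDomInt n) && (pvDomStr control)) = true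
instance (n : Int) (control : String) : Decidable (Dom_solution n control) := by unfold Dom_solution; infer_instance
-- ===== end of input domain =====

-- B replaces A's single accumulating indexed loop with a closed-form combination of four .count scans (idiomatic; same cost).


-- ===== PORT A =====
-- for i in range(len(control)): read control[i] — iterated as a fold over the characters in order
def solution (n : Int) (control : String) : Int :=
  control.toList.foldl
    (fun answer c =>
      if c == 'w' then answer + 1
      else if c == 's' then answer - 1
      else if c == 'd' then answer + 10
      else if c == 'a' then answer - 10
      else answer) n

-- ===== PORT B =====
def solution_alt (n : Int) (control : String) : Int :=
  n + (PySem.Str.count control "w" : Int) - (PySem.Str.count control "s" : Int)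
    + 10 * (PySem.Str.count control "d" : Int) - 10 * (PySem.Str.count control "a" : Int)

-- ===== PRECONDITION & SPEC =====
def Spec_solution (n : Int) (control : String) (out : Int) : Prop := out = solution_alt n control
instance (n : Int) (control : String) (out : Int) : Decidable (Spec_solution n control out) := by unfold Spec_solution; infer_instance

-- ===== CLAIM (what is proved, stated in full; the proofs are below) =====
def Claim_equal_solution : Prop := ∀ (n : Int) (control : String), Dom_solution n control → Spec_solution n control (solution n control)

-- ===== LEMMAS AND PROOFS =====

-- Python s.count(c) for a single character c is the character count.
theorem chars_count_go_singleton (c : Char) :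
    ∀ (fuel : Nat) (l : List Char) (acc : Nat), l.length ≤ fuel →
      PySem.Chars.count.go [c] fuel l acc = acc + l.count c := by
  intro fuel
  induction fuel with
  | zero =>
    intro l acc h
    cases l with
    | nil => simp [PySem.Chars.count.go]
    | cons x t => simp at h
  | succ f ih =>
    intro l acc h
    cases l with
    | nil => simp [PySem.Chars.count.go]
    | cons x t =>
      simp only [PySem.Chars.count.go]
      by_cases hx : x = c
      · subst hx
        simp [List.isPrefixOf, ih t (acc + 1) (by simpa using h)]
        omega
      · have : List.isPrefixOf [c] (x :: t) = false := by
          simp [List.isPrefixOf]; exact fun hcx => (hx hcx.symm).elim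
        simp [this, hx, ih t acc (by simpa using h)]

theorem chars_count_singleton (s : List Char) (c : Char) :
    PySem.Chars.count s [c] = s.count c := by
  simp [PySem.Chars.count, chars_count_go_singleton c s.length s 0 le_rfl]

-- Loop invariant: A's fold equals the closed-form count expression for any start value.
theorem fold_eq_counts (l : List Char) : ∀ (n : Int),
    l.foldl
      (fun answer c =>
        if c == 'w' then answer + 1
        else if c == 's' then answer - 1
        else if c == 'd' then answer + 10
        else if c == 'a' then answer - 10
        else answer) n
    = n + (l.count 'w' : Int) - (l.count 's' : Int)
        + 10 * (l.count 'd' : Int) - 10 * (l.count 'a' : Int) := by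
  induction l with
  | nil => intro n; simp
  | cons x t ih =>
    intro n
    simp only [List.foldl_cons, List.count_cons, ih]
    by_cases h1 : x = 'w' <;> by_cases h2 : x = 's' <;> by_cases h3 : x = 'd' <;>
      by_cases h4 : x = 'a' <;> simp_all <;> ring

-- ===== VERDICT (by name: the statement is the Claim_ definition above) =====
theorem solution_spec : Claim_equal_solution := by
  intro n control _
  show solution n control = solution_alt n control
  simp only [solution, solution_alt, PySem.Str.count, fold_eq_counts]
  rw [show ("w" : String).toList = ['w'] from rfl,
      show ("s" : String).toList = ['s'] from rfl,
      show ("d" : String).toList = ['d'] from rfl,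
      show ("a" : String).toList = ['a'] from rfl,
      chars_count_singleton, chars_count_singleton,
      chars_count_singleton, chars_count_singleton]
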